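-- pv_equiv track=rewrite | github.com/LiXi-storage/barreleye | pycoral/cmd_general.py | coral_release_name_is_valid
-- ===== SOURCE A (Python) =====
-- def coral_release_name_is_valid(value):
--     """
--     Check whether Coral release string is valid.
--     """
--     for char in value:
--         if char.isalnum() or char in ["_", "."]:
--             continue
--         return -1
--     if value in (".", ".."):
--         return -1
--     return 0
-- ===== SOURCE B (Python) =====
-- def coral_release_name_is_valid(value):
--     """
--     Check whether Coral release string is valid.
--     """
--     rest = value.replace("_", "").replace(".", "")
--     if rest != "" and not rest.isalnum():
--         return -1
--     if value in (".", ".."):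
--         return -1
--     return 0
-- ===== Notes on version B (the rewrite author's own statement) =====
-- stated objective: idiomatic
-- what changed: Replaces the explicit per-character loop with a remove-then-bulk-check: strip all '_' and '.' via str.replace and test the remainder with one str.isalnum call (empty remainder allowed), keeping the separate '.'/'..' rejection.
import Mathlib
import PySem

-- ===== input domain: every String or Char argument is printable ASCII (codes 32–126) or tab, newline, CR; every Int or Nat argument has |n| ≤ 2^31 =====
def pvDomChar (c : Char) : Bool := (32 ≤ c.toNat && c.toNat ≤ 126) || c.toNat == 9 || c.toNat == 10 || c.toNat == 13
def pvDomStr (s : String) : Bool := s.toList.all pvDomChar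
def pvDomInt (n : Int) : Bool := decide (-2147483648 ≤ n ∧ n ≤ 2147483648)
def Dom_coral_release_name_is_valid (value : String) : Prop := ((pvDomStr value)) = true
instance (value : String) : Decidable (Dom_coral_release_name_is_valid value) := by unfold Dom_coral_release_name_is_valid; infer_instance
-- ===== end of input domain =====

-- B replaces A's per-character loop with a remove-then-bulk-check via str.replace and one
-- str.isalnum test (objective: idiomatic); same return value everywhere.

-- ===== PORT A =====
-- the for-loop of A: early return -1 on a bad character, then the '.'/'..' check
def coralLoopA (value : String) : List Char → Int
  | [] => if value = "." ∨ value = ".." then -1 else 0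
  | c :: cs =>
      if PySem.Chars.isalnum c || c == '_' || c == '.' then coralLoopA value cs
      else -1

def coral_release_name_is_valid (value : String) : Int :=
  coralLoopA value value.toList

-- ===== PORT B =====
def coral_release_name_is_valid_alt (value : String) : Int :=
  let rest := PySem.Str.replace (PySem.Str.replace value "_" "") "." ""
  if !(rest == "") && !(PySem.Str.strIsalnum rest) then -1
  else if value == "." || value == ".." then -1
  else 0

-- ===== PRECONDITION & SPEC =====
def Spec_coral_release_name_is_valid (value : String) (out : Int) : Prop := out = coral_release_name_is_valid_alt value
instance (value : String) (out : Int) : Decidable (Spec_coral_release_name_is_valid value out) := by unfold Spec_coral_release_name_is_valid; infer_instance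

-- ===== CLAIM (what is proved, stated in full; the proofs are below) =====
def Claim_equal_coral_release_name_is_valid : Prop := ∀ (value : String), Dom_coral_release_name_is_valid value → Spec_coral_release_name_is_valid value (coral_release_name_is_valid value)

-- ===== LEMMAS AND PROOFS =====

-- replace.go with a single-character needle and empty replacement is a filter
theorem go_single (x : Char) : ∀ (l : List Char) (fuel : Nat) (acc : List Char),
    l.length ≤ fuel →
    PySem.Chars.replace.go [x] [] fuel l acc = acc.reverse ++ l.filter (fun c => !(c == x)) := by
  intro l
  induction l with
  | nil =>
      intro fuel acc _
      cases fuel <;> simp [PySem.Chars.replace.go]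
  | cons c t ih =>
      intro fuel acc h
      cases fuel with
      | zero => simp at h
      | succ n =>
        rw [PySem.Chars.replace.go]
        by_cases hc : c = x
        · subst hc
          simp only [List.isPrefixOf, Bool.and_true, BEq.rfl, if_true, List.reverse_nil,
            List.nil_append]
          simp only [List.length_cons, List.length_nil, List.drop_succ_cons, List.drop_zero]
          rw [ih n acc (Nat.le_of_succ_le_succ (by simpa using h))]
          simp
        · have hbe : (x == c) = false := by simp [Ne.symm hc]
          simp only [List.isPrefixOf, hbe, Bool.and_true, if_false, Bool.false_eq_true]
          rw [ih n (c :: acc) (Nat.le_of_succ_le_succ (by simpa using h))]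
          simp [hc]

theorem replace_single (s : List Char) (x : Char) :
    PySem.Chars.replace s [x] [] = s.filter (fun c => !(c == x)) := by
  rw [PySem.Chars.replace]
  simp [go_single x s s.length [] le_rfl]

-- A's loop in closed form
theorem loopA_eq (value : String) (l : List Char) :
    coralLoopA value l =
      if l.all (fun c => PySem.Chars.isalnum c || c == '_' || c == '.')
      then (if value = "." ∨ value = ".." then -1 else 0) else -1 := by
  induction l with
  | nil => simp [coralLoopA]
  | cons c t ih =>
      by_cases hc : (PySem.Chars.isalnum c || c == '_' || c == '.') = true
      · simp [coralLoopA, hc, ih]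
      · simp [coralLoopA, hc]

-- bulk check on the filtered remainder = per-character check on the whole string
theorem all_filter_eq (l : List Char) :
    ((l.filter (fun c => !(c == '_'))).filter (fun c => !(c == '.'))).all PySem.Chars.isalnum
      = l.all (fun c => PySem.Chars.isalnum c || c == '_' || c == '.') := by
  induction l with
  | nil => rfl
  | cons c t ih =>
      by_cases h1 : c = '_'
      · subst h1; simpa using ih
      · by_cases h2 : c = '.'
        · subst h2; simpa using ih
        · have hc1 : (c == '_') = false := by simp [h1]
          have hc2 : (c == '.') = false := by simp [h2]
          have hfun : (fun a : Char => a == '.' || a == '_' || PySem.Chars.isalnum a)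
              = (fun c => PySem.Chars.isalnum c || c == '_' || c == '.') := by
            funext a
            cases a == '.' <;> cases a == '_' <;> cases PySem.Chars.isalnum a <;> rfl
          simp [hc1, hc2, List.all_cons, hfun]

theorem toList_eq_nil_iff (s : String) : s.toList = [] ↔ s = "" := by
  constructor
  · intro h
    have := congrArg String.ofList h
    simpa using this
  · intro h; simp [h]

-- ===== VERDICT (by name: the statement is the Claim_ definition above) =====
theorem coral_release_name_is_valid_spec : Claim_equal_coral_release_name_is_valid := by
  intro value _
  unfold Spec_coral_release_name_is_valid
  unfold coral_release_name_is_valid coral_release_name_is_valid_alt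
  rw [loopA_eq]
  have hrest : (PySem.Str.replace (PySem.Str.replace value "_" "") "." "").toList
      = (value.toList.filter (fun c => !(c == '_'))).filter (fun c => !(c == '.')) := by
    have e1 : ("_" : String).toList = ['_'] := rfl
    have e2 : ("." : String).toList = ['.'] := rfl
    simp [PySem.Str.replace, e1, e2, replace_single]
  by_cases hall : value.toList.all (fun c => PySem.Chars.isalnum c || c == '_' || c == '.') = true
  · have hFall : ((value.toList.filter (fun c => !(c == '_'))).filter (fun c => !(c == '.'))).all
        PySem.Chars.isalnum = true := by rw [all_filter_eq]; exact hall
    have hcond : (!(PySem.Str.replace (PySem.Str.replace value "_" "") "." "" == "")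
        && !(PySem.Str.strIsalnum (PySem.Str.replace (PySem.Str.replace value "_" "") "." ""))) = false := by
      simp only [PySem.Str.strIsalnum_eq, PySem.Chars.strIsalnum, hrest]
      rcases hFe : ((value.toList.filter (fun c => !(c == '_'))).filter (fun c => !(c == '.'))).isEmpty with _ | _
      · simp only [Bool.not_false, Bool.true_and, hFall, Bool.not_true, Bool.and_false]

      · have hz : PySem.Str.replace (PySem.Str.replace value "_" "") "." "" = "" := by
          rw [← toList_eq_nil_iff, hrest]
          simpa [List.isEmpty_iff] using hFe
        simp only [hz, beq_self_eq_true, Bool.not_true, Bool.false_and]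
    simp only [hall, if_true, hcond, Bool.false_eq_true, if_false]
    by_cases hv1 : value = "." <;> by_cases hv2 : value = ".." <;> simp [hv1, hv2]
  · have hFne : ((value.toList.filter (fun c => !(c == '_'))).filter (fun c => !(c == '.'))).all
        PySem.Chars.isalnum = false := by
      rw [all_filter_eq]; exact Bool.eq_false_iff.mpr hall
    have hFnonempty : ((value.toList.filter (fun c => !(c == '_'))).filter (fun c => !(c == '.'))) ≠ [] := by
      intro h
      rw [h] at hFne; simp at hFne
    have hne : ¬ PySem.Str.replace (PySem.Str.replace value "_" "") "." "" = "" := by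
      intro h
      apply hFnonempty
      rw [← hrest, h]; rfl
    have hie : ((value.toList.filter (fun c => !(c == '_'))).filter (fun c => !(c == '.'))).isEmpty = false := by
      simp only [List.isEmpty_eq_false_iff]
      exact hFnonempty
    have hcond : (!(PySem.Str.replace (PySem.Str.replace value "_" "") "." "" == "")
        && !(PySem.Str.strIsalnum (PySem.Str.replace (PySem.Str.replace value "_" "") "." ""))) = true := by
      have hbeq : (PySem.Str.replace (PySem.Str.replace value "_" "") "." "" == "") = false := by
        simpa using hne
      simp only [PySem.Str.strIsalnum_eq, PySem.Chars.strIsalnum, hrest]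
      simp only [hbeq, hie, hFne, Bool.not_false, Bool.and_false, Bool.true_and]
    simp only [hall, Bool.false_eq_true, if_false, hcond, if_true]
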